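-- pv_equiv track=rewrite | github.com/22f3002712/TDS-P2B-Q4-Discourse | discourse_universal.py | find_topic
-- ===== SOURCE A (Python) =====
-- def find_topic(topics, title, date_prefix):
--     title_l = title.lower()
--     # exact title + date
--     for t in topics:
--         if title_l in t.get("title", "").lower() and t.get("created_at", "").startswith(date_prefix):
--             return t
--     # title only
--     for t in topics:
--         if title_l in t.get("title", "").lower():
--             return t
--     return None
-- ===== SOURCE B (Python) =====
-- def find_topic(topics, title, date_prefix):
--     title_l = title.lower()
--     fallback = None
--     for t in topics:
--         if title_l in t.get("title", "").lower():
--             if t.get("created_at", "").startswith(date_prefix):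
--                 return t
--             if fallback is None:
--                 fallback = t
--     return fallback
-- ===== Notes on version B (the rewrite author's own statement) =====
-- stated objective: simpler
-- what changed: Merges A's two passes over topics into one pass that returns immediately on a title+date match and remembers the first title-only match as a fallback returned after the loop.
import Mathlib
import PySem

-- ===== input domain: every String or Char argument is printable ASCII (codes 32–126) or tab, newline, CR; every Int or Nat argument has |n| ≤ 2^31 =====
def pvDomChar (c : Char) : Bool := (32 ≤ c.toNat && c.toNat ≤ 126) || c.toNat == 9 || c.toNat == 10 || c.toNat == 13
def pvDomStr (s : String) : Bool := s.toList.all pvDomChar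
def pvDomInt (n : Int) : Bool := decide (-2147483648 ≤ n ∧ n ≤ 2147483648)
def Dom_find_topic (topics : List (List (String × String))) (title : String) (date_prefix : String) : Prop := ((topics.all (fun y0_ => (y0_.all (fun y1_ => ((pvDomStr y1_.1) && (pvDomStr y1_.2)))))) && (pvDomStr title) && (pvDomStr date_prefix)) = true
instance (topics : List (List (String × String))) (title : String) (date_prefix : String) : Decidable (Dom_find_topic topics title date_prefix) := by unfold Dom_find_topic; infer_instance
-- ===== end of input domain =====

-- B merges A's two passes over topics into one pass carrying the first title-only match as a fallback; objective: simpler.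


-- ===== PORT A =====
-- first loop of A: title substring AND created_at starts with date_prefix
def findFull (title_l date_prefix : String) : List (List (String × String)) → Option (List (String × String))
  | [] => none
  | t :: ts =>
    if PySem.Str.isIn title_l (PySem.Str.lower (PySem.Dict.getD (PySem.Dict.mk t) "title" ""))
        && PySem.Str.startswith (PySem.Dict.getD (PySem.Dict.mk t) "created_at" "") date_prefix
    then some t
    else findFull title_l date_prefix ts

-- second loop of A: title substring only
def findTitle (title_l : String) : List (List (String × String)) → Option (List (String × String))
  | [] => none
  | t :: ts =>
    if PySem.Str.isIn title_l (PySem.Str.lower (PySem.Dict.getD (PySem.Dict.mk t) "title" ""))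
    then some t
    else findTitle title_l ts

def find_topic (topics : List (List (String × String))) (title : String) (date_prefix : String) : Option (List (String × String)) :=
  let title_l := PySem.Str.lower title
  match findFull title_l date_prefix topics with
  | some t => some t
  | none => findTitle title_l topics

-- ===== PORT B =====
-- single pass carrying the fallback (first title-only match)
def altLoop (title_l date_prefix : String) : List (List (String × String)) → Option (List (String × String)) → Option (List (String × String))
  | [], fb => fb
  | t :: ts, fb =>
    if PySem.Str.isIn title_l (PySem.Str.lower (PySem.Dict.getD (PySem.Dict.mk t) "title" "")) then
      if PySem.Str.startswith (PySem.Dict.getD (PySem.Dict.mk t) "created_at" "") date_prefix then some t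
      else altLoop title_l date_prefix ts (if fb.isNone then some t else fb)
    else altLoop title_l date_prefix ts fb

def find_topic_alt (topics : List (List (String × String))) (title : String) (date_prefix : String) : Option (List (String × String)) :=
  altLoop (PySem.Str.lower title) date_prefix topics none

-- ===== PRECONDITION & SPEC =====
def Spec_find_topic (topics : List (List (String × String))) (title : String) (date_prefix : String) (out : Option (List (String × String))) : Prop := out = find_topic_alt topics title date_prefix
instance (topics : List (List (String × String))) (title : String) (date_prefix : String) (out : Option (List (String × String))) : Decidable (Spec_find_topic topics title date_prefix out) := by unfold Spec_find_topic; infer_instance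

-- ===== CLAIM (what is proved, stated in full; the proofs are below) =====
def Claim_equal_find_topic : Prop := ∀ (topics : List (List (String × String))) (title : String) (date_prefix : String), Dom_find_topic topics title date_prefix → Spec_find_topic topics title date_prefix (find_topic topics title date_prefix)

-- ===== LEMMAS AND PROOFS =====
-- invariant of B's single pass: a later full match wins; otherwise the fallback, then the first title-only match
theorem altLoop_eq (title_l date_prefix : String) (ts : List (List (String × String))) :
    ∀ fb, altLoop title_l date_prefix ts fb =
      match findFull title_l date_prefix ts with
      | some t => some t
      | none => match fb with
        | some x => some x
        | none => findTitle title_l ts := by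
  induction ts with
  | nil => intro fb; cases fb <;> rfl
  | cons t ts ih =>
    intro fb
    by_cases h1 : PySem.Chars.isIn title_l.toList (PySem.Chars.lower ((PySem.Dict.mk t).getD "title" "").toList) = true
    · by_cases h2 : PySem.Chars.startswith ((PySem.Dict.mk t).getD "created_at" "").toList date_prefix.toList = true
      · simp [altLoop, findFull, h1, h2]
      · simp only [altLoop, findFull, findTitle, PySem.Str.isIn_eq, PySem.Str.startswith_eq,
          PySem.Str.lower, h2, ih]
        cases hf : findFull title_l date_prefix ts <;> cases fb <;> simp [h1]
      
    · simp only [altLoop, findFull, findTitle, PySem.Str.isIn_eq, PySem.Str.startswith_eq,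
        PySem.Str.lower, ih]
      cases hf : findFull title_l date_prefix ts <;> cases fb <;> simp [h1]

-- ===== VERDICT (by name: the statement is the Claim_ definition above) =====
theorem find_topic_spec : Claim_equal_find_topic := by
  intro topics title date_prefix _
  unfold Spec_find_topic find_topic find_topic_alt
  rw [altLoop_eq]
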